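-- pv_equiv track=rewrite | github.com/sdss/sdss_brain | python/sdss_brain/helpers/parsing.py | create_object_pattern
-- ===== SOURCE A (Python) =====
-- def create_object_pattern(regex: str = None, keys: list = None, keymap: dict = None,
--                           delimiter: str = '-', exclude: list = None, include: list = None,
--                           order: list = None) -> str:
--     """ Create a regex pattern to parse data input by
--
--     Parameters
--     ----------
--         regex : str
--             A custom regex pattern
--         keys : list
--             A list of (access) names to build a pattern out of
--         keymap : dict
--             A dict of key name and pattern to build a pattern out of
--         delimiter : str
--             The delimiter to use when joining the keys.  Default is "-".
--         exclude : list
--             A list of names to exclude from the keys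
--         include : list
--             A list of names to only include from the keys
--         order : list
--             A list of names specifying the order in which to create the keyed pattern
--
--     Returns
--     -------
--         pattern : str
--             A regex pattern to use for parsing an objectid
--     """
--
--     # use a custom regex pattern
--     if regex:
--         pattern = rf'(?P<objectid>(?![/$.])({regex}))'
--         return pattern
--
--     # if no keys or keymap, use a greedy default
--     if not keys and not keymap:
--         pattern = r'(?P<objectid>^[^/$.](.+)?)'
--         return pattern
--
--     assert keys or keymap, 'Either a list of keys or a keymap must be specified.'
--     assert isinstance(keys, (list, type(None))), 'keys must be a list'
--     assert isinstance(keymap, (dict, type(None))), 'keymap must be a dict'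
--     if not keys and keymap:
--         keys = list(keymap.keys())
--
--     # make a copy of the original key order
--     keys_copy = keys.copy()
--
--     # exclude the named keys
--     if exclude:
--         keys = list(set(keys) - set(exclude))
--
--     # only include the named keys
--     if include or order:
--         good = order or include
--         keys = list(set(good) & set(keys))
--
--     # resort the keys by the original key order
--     keys.sort(key=lambda i: keys_copy.index(i))
--
--     # order the keys
--     if order:
--         keys.sort(key=lambda i: order.index(i))
--
--     patts = []
--     for k in keys:
--         if not keymap:
--             patts.append(fr'(?P<{k}>(.+)?)')
--         else:
--             patts.append(fr'(?P<{k}>{keymap[k]})')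
--
--     # join into a single pattern
--     delimiter = '-' if not delimiter else delimiter
--     pattern = rf'(?P<objectid>(?![/$.])({delimiter.join(patts)}))'
--
--     return pattern
-- ===== SOURCE B (Python) =====
-- def create_object_pattern(regex=None, keys=None, keymap=None, delimiter='-',
--                           exclude=None, include=None, order=None):
--     # use a custom regex pattern
--     if regex:
--         return rf'(?P<objectid>(?![/$.])({regex}))'
--
--     # if no keys or keymap, use a greedy default
--     if not keys and not keymap:
--         return r'(?P<objectid>^[^/$.](.+)?)'
--
--     src = list(keys) if keys else list(keymap)
--
--     if exclude or include or order:
--         # one order-preserving, deduplicating filter pass; no sets, no sorting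
--         good = order or include
--         final = []
--         for k in (order if order else src):
--             if (k in src and k not in final
--                     and not (exclude and k in exclude)
--                     and not (good and k not in good)):
--                 final.append(k)
--     else:
--         final = src
--
--     sep = delimiter or '-'
--     patts = [rf'(?P<{k}>{keymap[k]})' if keymap else rf'(?P<{k}>(.+)?)'
--              for k in final]
--     return rf'(?P<objectid>(?![/$.])({sep.join(patts)}))'
-- ===== Notes on version B (the rewrite author's own statement) =====
-- stated objective: simpler
-- what changed: Replaces A's set-difference/set-intersection plus two index-keyed sorts by a single order-preserving deduplicating filter pass over the canonical source (order if given, else the keys), keeps the key list untouched when no filter is given, and builds the pattern list with a comprehension instead of an append loop; …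
import Mathlib
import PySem

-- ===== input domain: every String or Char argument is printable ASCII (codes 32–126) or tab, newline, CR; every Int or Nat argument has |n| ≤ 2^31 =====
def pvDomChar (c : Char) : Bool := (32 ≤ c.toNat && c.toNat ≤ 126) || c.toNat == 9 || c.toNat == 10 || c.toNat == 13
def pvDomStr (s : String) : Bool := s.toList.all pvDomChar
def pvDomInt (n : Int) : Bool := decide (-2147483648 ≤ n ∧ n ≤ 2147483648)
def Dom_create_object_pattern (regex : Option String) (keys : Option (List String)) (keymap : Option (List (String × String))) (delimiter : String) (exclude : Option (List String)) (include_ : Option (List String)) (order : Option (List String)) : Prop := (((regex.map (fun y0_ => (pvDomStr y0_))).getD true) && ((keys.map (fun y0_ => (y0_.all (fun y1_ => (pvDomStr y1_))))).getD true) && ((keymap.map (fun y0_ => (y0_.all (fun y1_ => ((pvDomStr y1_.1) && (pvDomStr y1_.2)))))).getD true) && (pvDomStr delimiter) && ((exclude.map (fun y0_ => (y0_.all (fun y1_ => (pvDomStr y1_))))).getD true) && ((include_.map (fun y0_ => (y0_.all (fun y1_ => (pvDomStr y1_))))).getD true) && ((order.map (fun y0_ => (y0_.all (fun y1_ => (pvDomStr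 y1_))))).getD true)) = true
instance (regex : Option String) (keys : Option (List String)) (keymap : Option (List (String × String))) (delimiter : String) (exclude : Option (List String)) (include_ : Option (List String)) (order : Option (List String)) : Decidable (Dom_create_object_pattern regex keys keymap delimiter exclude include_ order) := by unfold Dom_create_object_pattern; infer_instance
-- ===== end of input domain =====

-- B replaces A's set-difference/intersection plus two index-keyed sorts with one order-preserving
-- deduplicating filter pass (and leaves the keys untouched when no filter is given): simpler, same results.
-- NOTE: Python A sorts the caller's `keys` list in place; B does not mutate its arguments — the
-- equivalence proved here is about the RETURN value only.

-- truthiness of the optional arguments ('if regex:', 'if keys:', 'if keymap:')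
def pvTruthyS : Option String → Bool
  | none => false
  | some s => !(s == "")
def pvTruthyL : Option (List String) → Bool
  | none => false
  | some l => !l.isEmpty
def pvTruthyM : Option (List (String × String)) → Bool
  | none => false
  | some l => !l.isEmpty

-- ===== PORT A =====
def create_object_pattern (regex : Option String) (keys : Option (List String)) (keymap : Option (List (String × String))) (delimiter : String) (exclude : Option (List String)) (include_ : Option (List String)) (order : Option (List String)) : String :=
  if pvTruthyS regex then
    "(?P<objectid>(?![/$.])(" ++ regex.getD "" ++ "))"
  else if !pvTruthyL keys && !pvTruthyM keymap then
    "(?P<objectid>^[^/$.](.+)?)"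
  else
    let km : PySem.Dict String String := PySem.Dict.ofList (keymap.getD [])
    -- 'if not keys and keymap: keys = list(keymap.keys())'
    let keys0 : List String := if !pvTruthyL keys && pvTruthyM keymap then km.keys else keys.getD []
    let keys_copy : List String := keys0
    -- 'if exclude: keys = list(set(keys) - set(exclude))'
    let keys1 : List String :=
      if pvTruthyL exclude then PySem.Set.diff (PySem.Set.ofList keys0) (PySem.Set.ofList (exclude.getD [])) else keys0
    -- 'if include or order: good = order or include; keys = list(set(good) & set(keys))'
    let keys2 : List String :=
      if pvTruthyL include_ || pvTruthyL order then
        PySem.Set.inter (PySem.Set.ofList (if pvTruthyL order then order.getD [] else include_.getD [])) (PySem.Set.ofList keys1)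
      else keys1
    -- 'keys.sort(key=lambda i: keys_copy.index(i))' — every element is in keys_copy, so index never raises and '.getD 0' is exact
    let keys3 : List String := PySem.List.sorted keys2 (fun i => (PySem.List.index? keys_copy i).getD 0)
    -- 'if order: keys.sort(key=lambda i: order.index(i))' — every element is in order here
    let keys4 : List String :=
      if pvTruthyL order then PySem.List.sorted keys3 (fun i => (PySem.List.index? (order.getD []) i).getD 0) else keys3
    let patts : List String := keys4.foldl (fun acc k =>
      if !pvTruthyM keymap then acc ++ ["(?P<" ++ k ++ ">(.+)?)"]
      else acc ++ ["(?P<" ++ k ++ ">" ++ km.getD k "" ++ ")"]) []   -- keymap[k]; KeyError excluded by Pre_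
    let delim : String := if !(delimiter == "") then delimiter else "-"
    "(?P<objectid>(?![/$.])(" ++ PySem.Str.join delim patts ++ "))"

-- ===== PORT B =====
def create_object_pattern_alt (regex : Option String) (keys : Option (List String)) (keymap : Option (List (String × String))) (delimiter : String) (exclude : Option (List String)) (include_ : Option (List String)) (order : Option (List String)) : String :=
  if pvTruthyS regex then
    "(?P<objectid>(?![/$.])(" ++ regex.getD "" ++ "))"
  else if !pvTruthyL keys && !pvTruthyM keymap then
    "(?P<objectid>^[^/$.](.+)?)"
  else
    let km : PySem.Dict String String := PySem.Dict.ofList (keymap.getD [])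
    let src : List String := if pvTruthyL keys then keys.getD [] else km.keys
    let final : List String :=
      if pvTruthyL exclude || pvTruthyL include_ || pvTruthyL order then
        -- one order-preserving, deduplicating filter pass
        let good : List String := if pvTruthyL order then order.getD [] else include_.getD []
        (if pvTruthyL order then order.getD [] else src).foldl (fun acc k =>
          if src.contains k && !acc.contains k &&
             !(pvTruthyL exclude && (exclude.getD []).contains k) &&
             !(!good.isEmpty && !good.contains k) then acc ++ [k] else acc) []
      else src
    let patts : List String := final.map (fun k =>
      if pvTruthyM keymap then "(?P<" ++ k ++ ">" ++ km.getD k "" ++ ")"   -- keymap[k]; KeyError excluded by Pre_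
      else "(?P<" ++ k ++ ">(.+)?)")
    let sep : String := if pvTruthyS (some delimiter) then delimiter else "-"
    "(?P<objectid>(?![/$.])(" ++ PySem.Str.join sep patts ++ "))"

-- ===== PRECONDITION & SPEC =====
-- the filters a key of `keys` must pass to reach the pattern loop (where keymap[k] is looked up)
def pvPass (exclude include_ order : Option (List String)) (k : String) : Bool :=
  (!(pvTruthyL exclude) || !((exclude.getD []).contains k)) &&
  (!(pvTruthyL include_ || pvTruthyL order) ||
    (if pvTruthyL order then (order.getD []).contains k else (include_.getD []).contains k))

-- Pre_ excludes (a) inputs where Python A raises KeyError — an explicit `keys` list together with a non-empty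
-- `keymap` where some key surviving the exclude/include/order filters is missing from the keymap — and
-- (b) unfiltered `keys` lists with duplicate entries, a defensible unspecified corner (both outputs carry a
-- duplicate group name, invalid as a regex): A regroups the duplicates at their first occurrence, B keeps the given order.
def Pre_create_object_pattern (regex : Option String) (keys : Option (List String)) (keymap : Option (List (String × String))) (delimiter : String) (exclude : Option (List String)) (include_ : Option (List String)) (order : Option (List String)) : Prop :=
  (pvTruthyS regex = false → pvTruthyL keys = true → pvTruthyM keymap = true →
    ∀ k ∈ keys.getD [], pvPass exclude include_ order k = true →
      k ∈ (PySem.Dict.ofList (keymap.getD [])).keys) ∧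
  (pvTruthyS regex = false → pvTruthyL keys = true →
    (pvTruthyL exclude || pvTruthyL include_ || pvTruthyL order) = false →
      (keys.getD []).Nodup)
instance (regex : Option String) (keys : Option (List String)) (keymap : Option (List (String × String))) (delimiter : String) (exclude : Option (List String)) (include_ : Option (List String)) (order : Option (List String)) : Decidable (Pre_create_object_pattern regex keys keymap delimiter exclude include_ order) := by unfold Pre_create_object_pattern; infer_instance

def pvWitness_create_object_pattern : Option String × Option (List String) × (Option (List (String × String))) × String × Option (List String) × Option (List String) × Option (List String) :=
  (none, some ["a", "b", "a"], none, "-", some ["b"], none, none)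

def Spec_create_object_pattern (regex : Option String) (keys : Option (List String)) (keymap : Option (List (String × String))) (delimiter : String) (exclude : Option (List String)) (include_ : Option (List String)) (order : Option (List String)) (out : String) : Prop := out = create_object_pattern_alt regex keys keymap delimiter exclude include_ order
instance (regex : Option String) (keys : Option (List String)) (keymap : Option (List (String × String))) (delimiter : String) (exclude : Option (List String)) (include_ : Option (List String)) (order : Option (List String)) (out : String) : Decidable (Spec_create_object_pattern regex keys keymap delimiter exclude include_ order out) := by unfold Spec_create_object_pattern; infer_instance

-- ===== CLAIM (what is proved, stated in full; the proofs are below) =====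
def Claim_equal_create_object_pattern : Prop := ∀ (regex : Option String) (keys : Option (List String)) (keymap : Option (List (String × String))) (delimiter : String) (exclude : Option (List String)) (include_ : Option (List String)) (order : Option (List String)), Dom_create_object_pattern regex keys keymap delimiter exclude include_ order → Pre_create_object_pattern regex keys keymap delimiter exclude include_ order → Spec_create_object_pattern regex keys keymap delimiter exclude include_ order (create_object_pattern regex keys keymap delimiter exclude include_ order)

-- ===== LEMMAS AND PROOFS =====

-- 'l.index(a)' for a member: idxOf? returns exactly the first index
theorem pvIdxOfSome (a : String) : ∀ (l : List String), a ∈ l → List.idxOf? a l = some (l.idxOf a) := by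
  intro l
  induction l with
  | nil => intro h; simp at h
  | cons x t ih =>
    intro h
    by_cases hx : x = a
    · subst hx; simp [List.idxOf?_cons, List.idxOf_cons_self]
    · rcases List.mem_cons.mp h with rfl | ht
      · exact absurd rfl hx
      · simp [List.idxOf?_cons, hx, ih ht, List.idxOf_cons_ne _ hx]

-- 'keys_copy.index(i)' as a total function agrees with List.idxOf on members
theorem pvIndexGetD {l : List String} {a : String} (h : a ∈ l) :
    (PySem.List.index? l a).getD 0 = l.idxOf a := by
  unfold PySem.List.index?
  rw [pvIdxOfSome a l h]
  rfl

-- the distinct elements of l, in first-occurrence order, have strictly increasing first indices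
theorem pvPW (l : List String) :
    (PySem.Set.ofList l).Pairwise (fun a b => l.idxOf a < l.idxOf b) := by
  induction l with
  | nil => simp [PySem.Set.ofList_nil]
  | cons x t ih =>
    rw [PySem.Set.ofList_cons]
    refine List.pairwise_cons.mpr ⟨?_, ?_⟩
    · intro b hb
      obtain ⟨hbs, hbx⟩ := (PySem.Set.mem_discard _ _ _).mp hb
      rw [List.idxOf_cons_self, List.idxOf_cons_ne _ (Ne.symm hbx)]
      exact Nat.succ_pos _
    · have hd : (PySem.Set.ofList t).discard x = (PySem.Set.ofList t).filter (fun y => !(y == x)) := rfl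
      rw [hd]
      refine List.Pairwise.imp_of_mem ?_ (List.Pairwise.filter _ ih)
      intro a b ha hb hr
      have hax : a ≠ x := by simpa using List.of_mem_filter ha
      have hbx : b ≠ x := by simpa using List.of_mem_filter hb
      rw [List.idxOf_cons_ne _ (Ne.symm hax), List.idxOf_cons_ne _ (Ne.symm hbx)]
      exact Nat.succ_lt_succ hr

-- dedup of a filtered list = filtered dedup
theorem pvOfListFilter (l : List String) (p : String → Bool) :
    PySem.Set.ofList (l.filter p) = (PySem.Set.ofList l).filter p := by
  induction l with
  | nil => simp [PySem.Set.ofList_nil]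
  | cons x t ih =>
    cases hp : p x with
    | true =>
      rw [List.filter_cons_of_pos hp, PySem.Set.ofList_cons, PySem.Set.ofList_cons,
          List.filter_cons_of_pos hp, ih]
      congr 1
      simp only [PySem.Set.discard, List.filter_filter]
      exact List.filter_congr (fun a _ => Bool.and_comm _ _)
    | false =>
      rw [List.filter_cons_of_neg (by simp [hp]), PySem.Set.ofList_cons,
          List.filter_cons_of_neg (by simp [hp]), ih]
      simp only [PySem.Set.discard, List.filter_filter]
      apply List.filter_congr
      intro a _
      by_cases hax : a = x
      · subst hax; simp [hp]
      · simp [hax]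

-- strictly increasing key sequence along a filtered dedup
theorem pvPWfilter (l : List String) (p : String → Bool) :
    ((PySem.Set.ofList l).filter p).Pairwise
      (fun a b => (PySem.List.index? l a).getD 0 < (PySem.List.index? l b).getD 0) := by
  refine List.Pairwise.imp_of_mem ?_ (List.Pairwise.filter p (pvPW l))
  intro a b ha hb hr
  have ha' : a ∈ l := (PySem.Set.mem_ofList l a).mp (List.mem_of_mem_filter ha)
  have hb' : b ∈ l := (PySem.Set.mem_ofList l b).mp (List.mem_of_mem_filter hb)
  rw [pvIndexGetD ha', pvIndexGetD hb']
  exact hr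

-- any Nodup list with the membership of a filtered dedup of l, sorted by first index in l, IS that filtered dedup
theorem pvSortedFilter (l : List String) (xs : List String) (p : String → Bool)
    (hnd : xs.Nodup) (hmem : ∀ y, y ∈ xs ↔ y ∈ (PySem.Set.ofList l).filter p) :
    PySem.List.sorted xs (fun i => (PySem.List.index? l i).getD 0) = (PySem.Set.ofList l).filter p := by
  apply PySem.List.sorted_eq_of_perm_of_pairwise_lt
  · exact (List.perm_ext_iff_of_nodup (List.Nodup.filter _ (PySem.Set.nodup_ofList l)) hnd).mpr
      (fun a => (hmem a).symm)
  · exact pvPWfilter l p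

-- sorting a Nodup list by the first index of its own elements changes nothing
theorem pvSortedNodup (l : List String) (h : l.Nodup) :
    PySem.List.sorted l (fun i => (PySem.List.index? l i).getD 0) = l := by
  have hself : PySem.Set.ofList l = l := PySem.Set.ofList_eq_self_of_nodup l h
  have := pvSortedFilter l l (fun _ => true) h (by
    intro y
    rw [List.filter_eq_self.mpr (by intro a _; rfl), hself])
  rwa [List.filter_eq_self.mpr (by intro a _; rfl), hself] at this

-- B's deduplicating filter pass, characterised as a filtered dedup of the iterated list
theorem pvLoopEq (iter src excl good : List String) (te : Bool) :
    iter.foldl (fun acc k =>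
        if src.contains k && !acc.contains k && !(te && excl.contains k) &&
           !(!good.isEmpty && !good.contains k) then acc ++ [k] else acc) [] =
      (PySem.Set.ofList iter).filter
        (fun k => src.contains k && !(te && excl.contains k) && !(!good.isEmpty && !good.contains k)) := by
  have hstep : (fun (acc : List String) k =>
      if src.contains k && !acc.contains k && !(te && excl.contains k) &&
         !(!good.isEmpty && !good.contains k) then acc ++ [k] else acc) =
    (fun (acc : List String) k =>
      if (src.contains k && !(te && excl.contains k) && !(!good.isEmpty && !good.contains k)) then
        PySem.Set.add acc k else acc) := by
    funext acc k
    by_cases h1 : k ∈ acc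
    · have hacc : acc.contains k = true := List.contains_iff_mem.mpr h1
      rw [PySem.Set.add_of_mem h1, ite_self, if_neg (by simp [h1])]
    · have hacc : acc.contains k = false := by
        cases h : acc.contains k
        · rfl
        · exact absurd (List.contains_iff_mem.mp h) h1
      rw [PySem.Set.add_of_not_mem h1]
      cases h2 : src.contains k <;> cases h3 : te && excl.contains k <;>
        cases h4 : (!good.isEmpty && !good.contains k) <;> simp [h1]
  rw [hstep, PySem.List.foldl_if_eq_foldl_filter, ← PySem.Set.ofList_eq_foldl, pvOfListFilter]

-- A's diff/inter + two index-keyed sorts equal B's single deduplicating filter pass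
theorem pvFilteredEq (src excl g ordL : List String) (te tio tob : Bool)
    (hOrd : tob = true → g = ordL)
    (hto : tob = true → g ≠ [])
    (htio : tio = !g.isEmpty)
    (hf : (te || tio) = true) :
    (if tob then
        PySem.List.sorted (PySem.List.sorted
            (if tio then PySem.Set.inter (PySem.Set.ofList g) (PySem.Set.ofList (if te then PySem.Set.diff (PySem.Set.ofList src) (PySem.Set.ofList excl) else src))
             else (if te then PySem.Set.diff (PySem.Set.ofList src) (PySem.Set.ofList excl) else src))
            (fun i => (PySem.List.index? src i).getD 0))
          (fun i => (PySem.List.index? ordL i).getD 0)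
      else
        PySem.List.sorted
          (if tio then PySem.Set.inter (PySem.Set.ofList g) (PySem.Set.ofList (if te then PySem.Set.diff (PySem.Set.ofList src) (PySem.Set.ofList excl) else src))
           else (if te then PySem.Set.diff (PySem.Set.ofList src) (PySem.Set.ofList excl) else src))
          (fun i => (PySem.List.index? src i).getD 0)) =
    (if tob then ordL else src).foldl (fun acc k =>
        if src.contains k && !acc.contains k && !(te && excl.contains k) &&
           !(!g.isEmpty && !g.contains k) then acc ++ [k] else acc) [] := by
  rw [pvLoopEq]
  subst htio
  have hk1mem : ∀ y, y ∈ (if te then PySem.Set.diff (PySem.Set.ofList src) (PySem.Set.ofList excl) else src) ↔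
      (y ∈ src ∧ (te = true → y ∉ excl)) := by
    intro y
    cases te
    · simp
    · rw [if_pos rfl]
      simp [PySem.Set.mem_diff, PySem.Set.mem_ofList]
  cases htob : tob with
  | false =>
    simp only [Bool.false_eq_true, if_false]
    cases hg : g.isEmpty with
    | true =>
      have hg' : g = [] := by simpa using hg
      have hte : te = true := by simpa [hg] using hf
      subst hte
      simp only [Bool.not_true, Bool.false_eq_true, if_false, if_true]
      apply pvSortedFilter
      · exact List.Nodup.filter _ (PySem.Set.nodup_ofList src)
      · intro y
        simp [PySem.Set.mem_diff, PySem.Set.mem_ofList, List.mem_filter, List.contains_iff_mem]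
    | false =>
      have hg' : g ≠ [] := fun h => by simp [h] at hg
      simp only [Bool.not_false, if_true]
      apply pvSortedFilter
      · exact List.Nodup.filter _ (PySem.Set.nodup_ofList g)
      · intro y
        simp only [PySem.Set.mem_inter, PySem.Set.mem_ofList, List.mem_filter, hk1mem y]
        rcases Bool.eq_false_or_eq_true te with hte | hte <;> subst hte <;>
          simp [List.contains_iff_mem, hg'] <;> tauto
  | true =>
    have hgOrd : g = ordL := hOrd htob
    have hg' : g ≠ [] := hto htob
    have hg : g.isEmpty = false := by
      cases hgi : g.isEmpty
      · rfl
      · exact absurd (by simpa using hgi) hg'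
    subst hgOrd
    simp only [if_true, hg, Bool.not_false]
    apply pvSortedFilter
    · exact (PySem.List.sorted_perm _ _ _).symm.nodup (List.Nodup.filter _ (PySem.Set.nodup_ofList g))
    · intro y
      rw [PySem.List.mem_sorted]
      simp only [PySem.Set.mem_inter, PySem.Set.mem_ofList, List.mem_filter, hk1mem y]
      rcases Bool.eq_false_or_eq_true te with hte | hte <;> subst hte <;>
        simp [List.contains_iff_mem, hg'] <;> tauto

-- A's append loop over the keys builds exactly B's comprehension (map)
theorem pvFoldlMap (f : String → String) : ∀ (l : List String) (acc : List String),
    l.foldl (fun a k => a ++ [f k]) acc = acc ++ l.map f := by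
  intro l
  induction l with
  | nil => intro acc; simp
  | cons x t ih => intro acc; simp [ih]

-- pvTruthyL as an isEmpty test on the defaulted list
theorem pvTruthyGetD (o : Option (List String)) : pvTruthyL o = !(o.getD []).isEmpty := by
  cases o <;> simp [pvTruthyL]

-- ===== VERDICT (by name: the statement is the Claim_ definition above) =====
theorem create_object_pattern_spec : Claim_equal_create_object_pattern := by
  intro regex keys keymap delimiter exclude include_ order hdom hpre
  obtain ⟨hpreK, hpreD⟩ := hpre
  unfold Spec_create_object_pattern create_object_pattern create_object_pattern_alt
  by_cases hr : pvTruthyS regex = true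
  · rw [if_pos hr, if_pos hr]
  · rw [if_neg hr, if_neg hr]
    by_cases hkm : (!pvTruthyL keys && !pvTruthyM keymap) = true
    · rw [if_pos hkm, if_pos hkm]
    · rw [if_neg hkm, if_neg hkm]
      have hsrc : (if !pvTruthyL keys && pvTruthyM keymap then (PySem.Dict.ofList (keymap.getD [])).keys else keys.getD [])
          = (if pvTruthyL keys then keys.getD [] else (PySem.Dict.ofList (keymap.getD [])).keys) := by
        cases hk : pvTruthyL keys <;> cases hm : pvTruthyM keymap <;> simp_all
      have hkeys :
          (if pvTruthyL order then
              PySem.List.sorted (PySem.List.sorted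
                  (if pvTruthyL include_ || pvTruthyL order then
                      PySem.Set.inter (PySem.Set.ofList (if pvTruthyL order then order.getD [] else include_.getD []))
                        (PySem.Set.ofList (if pvTruthyL exclude then
                            PySem.Set.diff
                              (PySem.Set.ofList (if !pvTruthyL keys && pvTruthyM keymap then (PySem.Dict.ofList (keymap.getD [])).keys else keys.getD []))
                              (PySem.Set.ofList (exclude.getD []))
                          else (if !pvTruthyL keys && pvTruthyM keymap then (PySem.Dict.ofList (keymap.getD [])).keys else keys.getD [])))
                    else (if pvTruthyL exclude then
                        PySem.Set.diff
                          (PySem.Set.ofList (if !pvTruthyL keys && pvTruthyM keymap then (PySem.Dict.ofList (keymap.getD [])).keys else keys.getD []))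
                          (PySem.Set.ofList (exclude.getD []))
                      else (if !pvTruthyL keys && pvTruthyM keymap then (PySem.Dict.ofList (keymap.getD [])).keys else keys.getD [])))
                  (fun i => (PySem.List.index? (if !pvTruthyL keys && pvTruthyM keymap then (PySem.Dict.ofList (keymap.getD [])).keys else keys.getD []) i).getD 0))
                (fun i => (PySem.List.index? (order.getD []) i).getD 0)
            else
              PySem.List.sorted
                (if pvTruthyL include_ || pvTruthyL order then
                    PySem.Set.inter (PySem.Set.ofList (if pvTruthyL order then order.getD [] else include_.getD []))
                      (PySem.Set.ofList (if pvTruthyL exclude then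
                          PySem.Set.diff
                            (PySem.Set.ofList (if !pvTruthyL keys && pvTruthyM keymap then (PySem.Dict.ofList (keymap.getD [])).keys else keys.getD []))
                            (PySem.Set.ofList (exclude.getD []))
                        else (if !pvTruthyL keys && pvTruthyM keymap then (PySem.Dict.ofList (keymap.getD [])).keys else keys.getD [])))
                  else (if pvTruthyL exclude then
                      PySem.Set.diff
                        (PySem.Set.ofList (if !pvTruthyL keys && pvTruthyM keymap then (PySem.Dict.ofList (keymap.getD [])).keys else keys.getD []))
                        (PySem.Set.ofList (exclude.getD []))
                    else (if !pvTruthyL keys && pvTruthyM keymap then (PySem.Dict.ofList (keymap.getD [])).keys else keys.getD [])))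
                (fun i => (PySem.List.index? (if !pvTruthyL keys && pvTruthyM keymap then (PySem.Dict.ofList (keymap.getD [])).keys else keys.getD []) i).getD 0)) =
          (if pvTruthyL exclude || pvTruthyL include_ || pvTruthyL order then
              (if pvTruthyL order then order.getD [] else (if pvTruthyL keys then keys.getD [] else (PySem.Dict.ofList (keymap.getD [])).keys)).foldl
                (fun acc k =>
                  if (if pvTruthyL keys then keys.getD [] else (PySem.Dict.ofList (keymap.getD [])).keys).contains k &&
                     !acc.contains k &&
                     !(pvTruthyL exclude && (exclude.getD []).contains k) &&
                     !(!(if pvTruthyL order then order.getD [] else include_.getD []).isEmpty &&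
                       !(if pvTruthyL order then order.getD [] else include_.getD []).contains k)
                  then acc ++ [k] else acc) []
            else (if pvTruthyL keys then keys.getD [] else (PySem.Dict.ofList (keymap.getD [])).keys)) := by
        rw [hsrc]
        by_cases hfil : (pvTruthyL exclude || pvTruthyL include_ || pvTruthyL order) = true
        · rw [if_pos hfil]
          refine pvFilteredEq _ _ _ _ _ _ _ ?_ ?_ ?_ (by rw [← Bool.or_assoc]; exact hfil)
          · intro h; rw [if_pos h]
          · intro h hnil
            rw [if_pos h] at hnil
            rw [pvTruthyGetD order, hnil] at h
            simp at h
          · rcases Bool.eq_false_or_eq_true (pvTruthyL order) with ho | ho <;>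
              simp [ho, ← pvTruthyGetD]
        · rw [if_neg hfil]
          simp only [Bool.or_eq_true, not_or, Bool.not_eq_true] at hfil
          obtain ⟨⟨hte, hti⟩, hto⟩ := hfil
          rw [if_neg (by simp [hto]), if_neg (by simp [hti, hto]), if_neg (by simp [hte])]
          apply pvSortedNodup
          cases hk : pvTruthyL keys with
          | true =>
            rw [if_pos rfl]
            exact hpreD (by simpa using hr) hk (by simp [hte, hti, hto])
          | false =>
            rw [if_neg (by simp)]
            exact PySem.Dict.nodup_keys_ofList _
      simp only [hkeys]
      have hpatts : ∀ (L : List String),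
          L.foldl (fun acc k =>
            if !pvTruthyM keymap then acc ++ ["(?P<" ++ k ++ ">(.+)?)"]
            else acc ++ ["(?P<" ++ k ++ ">" ++ (PySem.Dict.ofList (keymap.getD [])).getD k "" ++ ")"]) [] =
          L.map (fun k =>
            if pvTruthyM keymap then "(?P<" ++ k ++ ">" ++ (PySem.Dict.ofList (keymap.getD [])).getD k "" ++ ")"
            else "(?P<" ++ k ++ ">(.+)?)") := by
        intro L
        cases hm : pvTruthyM keymap <;> simp only [hm, Bool.not_true, Bool.not_false,
          Bool.false_eq_true, if_true, if_false] <;> exact (pvFoldlMap _ L []).trans (by simp)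
      simp only [hpatts]
      rfl
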